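-- pv_equiv track=rewrite | github.com/hhcmenzies/hhcmenzies-GEDCOM_Parser_Project | src/gedcom_parser/postprocess/entity_resolution.py | generate_block_pairs
-- ===== SOURCE A (Python) =====
-- from typing import Any, Dict, Iterable, List, Optional, Tuple
--
-- def generate_block_pairs(blocks: Dict[str, List[str]], max_pairs: int) -> List[Tuple[str, str]]:
--     """
--     Generate candidate pairs within each block.
--     """
--     pairs: List[Tuple[str, str]] = []
--
--     for _, ids in blocks.items():
--         n = len(ids)
--         if n < 2:
--             continue
--         for i in range(n):
--             for j in range(i + 1, n):
--                 pairs.append((ids[i], ids[j]))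
--                 if len(pairs) >= max_pairs:
--                     return pairs
--
--     return pairs
-- ===== SOURCE B (Python) =====
-- from typing import Any, Dict, Iterable, List, Optional, Tuple
--
-- def generate_block_pairs(blocks: Dict[str, List[str]], max_pairs: int) -> List[Tuple[str, str]]:
--     """Generate candidate pairs within each block (flatten-then-slice)."""
--     pairs = [(a, b)
--              for ids in blocks.values()
--              for k, a in enumerate(ids)
--              for b in ids[k + 1:]]
--     return pairs[:max(0, max_pairs)]
-- ===== Notes on version B (the rewrite author's own statement) =====
-- stated objective: simpler
-- what changed: A walks blocks with nested index loops, a manual pair counter and a mid-loop early return; B builds the flat list of within-block pairs with one comprehension and slices off the first max(0, max_pairs).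
-- intended difference: When max_pairs <= 0 and some block holds at least two ids, A still returns the first pair (its cap check runs only after appending), while B returns [], the intended 'at most max_pairs pairs' result. — e.g. on generate_block_pairs([("b", ["x", "y"])], 0): A returns [("x", "y")], B returns []
import Mathlib
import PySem

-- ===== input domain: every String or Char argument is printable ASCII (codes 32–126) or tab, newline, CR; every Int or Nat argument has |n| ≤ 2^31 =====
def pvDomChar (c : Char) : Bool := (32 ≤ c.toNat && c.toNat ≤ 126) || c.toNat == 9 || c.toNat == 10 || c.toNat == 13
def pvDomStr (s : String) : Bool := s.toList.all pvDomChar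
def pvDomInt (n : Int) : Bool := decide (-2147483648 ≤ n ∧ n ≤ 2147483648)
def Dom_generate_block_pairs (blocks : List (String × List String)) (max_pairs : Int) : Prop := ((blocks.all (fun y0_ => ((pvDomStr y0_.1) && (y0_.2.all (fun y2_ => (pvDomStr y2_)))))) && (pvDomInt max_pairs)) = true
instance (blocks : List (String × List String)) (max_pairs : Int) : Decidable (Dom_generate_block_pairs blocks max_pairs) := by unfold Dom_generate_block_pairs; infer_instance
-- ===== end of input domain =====

-- B replaces A's nested index loops with manual counter and early return by one flat
-- comprehension of all within-block pairs followed by a slice (objective: simpler).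

-- ===== PORT A =====
-- inner `for j in range(i+1, n)` loop; Bool = "early return taken"
def pvJLoop (ids : List String) (i : Int) (max_pairs : Int)
    (pairs : List (String × String)) (js : List Int) : List (String × String) × Bool :=
  match js with
  | [] => (pairs, false)
  | j :: js' =>
    let pairs' := pairs ++ [(PySem.List.pyGetD ids i "", PySem.List.pyGetD ids j "")]
    if (pairs'.length : Int) ≥ max_pairs then (pairs', true)
    else pvJLoop ids i max_pairs pairs' js'

-- outer `for i in range(n)` loop
def pvILoop (ids : List String) (n : Int) (max_pairs : Int)
    (pairs : List (String × String)) (is : List Int) : List (String × String) × Bool :=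
  match is with
  | [] => (pairs, false)
  | i :: is' =>
    match pvJLoop ids i max_pairs pairs (PySem.List.pyRange (i + 1) n 1) with
    | (p, true) => (p, true)
    | (p, false) => pvILoop ids n max_pairs p is'

-- `for _, ids in blocks.items()` loop
def pvBlocksLoop (max_pairs : Int) (pairs : List (String × String))
    (bs : List (String × List String)) : List (String × String) :=
  match bs with
  | [] => pairs
  | (_, ids) :: bs' =>
    let n : Int := ids.length
    if n < 2 then pvBlocksLoop max_pairs pairs bs'
    else
      match pvILoop ids n max_pairs pairs (PySem.List.pyRange 0 n 1) with
      | (p, true) => p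
      | (p, false) => pvBlocksLoop max_pairs p bs'

def generate_block_pairs (blocks : List (String × List String)) (max_pairs : Int) : List (String × String) :=
  pvBlocksLoop max_pairs [] blocks

-- ===== PORT B =====
-- `[(a, b) for k, a in enumerate(ids) for b in ids[k+1:]]` for one block
def pvCombs (ids : List String) : List (String × String) :=
  (PySem.List.enumerate ids 0).flatMap (fun ka =>
    (PySem.List.slice ids (some (ka.1 + 1)) none).map (fun b => (ka.2, b)))

def generate_block_pairs_alt (blocks : List (String × List String)) (max_pairs : Int) : List (String × String) :=
  let pairs := blocks.flatMap (fun blk => pvCombs blk.2)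
  PySem.List.slice pairs none (some (max 0 max_pairs))

-- ===== PRECONDITION & SPEC =====
-- When max_pairs ≤ 0 and some block holds ≥ 2 ids, A still returns the first pair (its
-- cap check runs only after appending), while B returns [], the intended "at most
-- max_pairs pairs" result.
def D_generate_block_pairs (blocks : List (String × List String)) (max_pairs : Int) : Prop :=
  max_pairs ≤ 0 ∧ ∃ blk ∈ blocks, 2 ≤ blk.2.length
instance (blocks : List (String × List String)) (max_pairs : Int) : Decidable (D_generate_block_pairs blocks max_pairs) := by unfold D_generate_block_pairs; infer_instance

def Spec_generate_block_pairs (blocks : List (String × List String)) (max_pairs : Int) (out : List (String × String)) : Prop := ¬ D_generate_block_pairs blocks max_pairs → out = generate_block_pairs_alt blocks max_pairs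
instance (blocks : List (String × List String)) (max_pairs : Int) (out : List (String × String)) : Decidable (Spec_generate_block_pairs blocks max_pairs out) := by unfold Spec_generate_block_pairs; infer_instance

def pvDiffWitness_generate_block_pairs : (List (String × List String)) × Int := ([("b", ["x", "y"])], 0)
def pvDiffWitnessOut_generate_block_pairs : (List (String × String)) × (List (String × String)) := ([("x", "y")], [])

-- ===== CLAIM (what is proved, stated in full; the proofs are below) =====
def Claim_unchanged_generate_block_pairs : Prop := ∀ (blocks : List (String × List String)) (max_pairs : Int), Dom_generate_block_pairs blocks max_pairs → Spec_generate_block_pairs blocks max_pairs (generate_block_pairs blocks max_pairs)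
def Claim_changed_generate_block_pairs : Prop := Dom_generate_block_pairs (pvDiffWitness_generate_block_pairs.1) (pvDiffWitness_generate_block_pairs.2) ∧ D_generate_block_pairs (pvDiffWitness_generate_block_pairs.1) (pvDiffWitness_generate_block_pairs.2) ∧ generate_block_pairs (pvDiffWitness_generate_block_pairs.1) (pvDiffWitness_generate_block_pairs.2) = pvDiffWitnessOut_generate_block_pairs.1 ∧ generate_block_pairs_alt (pvDiffWitness_generate_block_pairs.1) (pvDiffWitness_generate_block_pairs.2) = pvDiffWitnessOut_generate_block_pairs.2 ∧ pvDiffWitnessOut_generate_block_pairs.1 ≠ pvDiffWitnessOut_generate_block_pairs.2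
def Claim_exact_generate_block_pairs : Prop := ∀ (blocks : List (String × List String)) (max_pairs : Int), Dom_generate_block_pairs blocks max_pairs → D_generate_block_pairs blocks max_pairs → generate_block_pairs blocks max_pairs ≠ generate_block_pairs_alt blocks max_pairs

-- ===== LEMMAS AND PROOFS =====

-- number of pairs A still appends before its cap check fires, given `acc` already appended
def pvK (m : Int) (acc : List (String × String)) : Nat := (max (m - acc.length) 1).toNat

-- closed form of A's capped-append behaviour on one list of candidate pairs
def pvCap (m : Int) (acc xs : List (String × String)) : List (String × String) × Bool :=
  (acc ++ xs.take (pvK m acc), decide (pvK m acc ≤ xs.length))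

lemma pvK_pos (m : Int) (acc : List (String × String)) : 1 ≤ pvK m acc := by
  unfold pvK; omega

lemma pvJLoop_eq_cap (ids : List String) (i m : Int) :
    ∀ (js : List Int) (acc : List (String × String)),
      pvJLoop ids i m acc js
        = pvCap m acc (js.map (fun j => (PySem.List.pyGetD ids i "", PySem.List.pyGetD ids j ""))) := by
  intro js
  induction js with
  | nil =>
    intro acc
    have h := pvK_pos m acc
    simp [pvJLoop, pvCap]
    omega
  | cons j js' ih =>
    intro acc
    have h := pvK_pos m acc
    by_cases hstop : m ≤ (acc.length : Int) + 1
    · have hK : pvK m acc = 1 := by unfold pvK; omega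
      rw [pvJLoop, if_pos (by simp; omega)]
      simp [pvCap, hK]
    · have hK : pvK m acc = pvK m (acc ++ [(PySem.List.pyGetD ids i "", PySem.List.pyGetD ids j "")]) + 1 := by
        unfold pvK; simp; omega
      rw [pvJLoop, if_neg (by simp; omega), ih]
      simp only [pvCap, hK, List.take_succ_cons, List.map_cons, List.length_cons,
        List.length_map, Prod.mk.injEq, List.append_assoc, List.cons_append]
      refine ⟨by simp, ?_⟩
      rw [decide_eq_decide]
      omega

lemma pvCap_append (m : Int) (acc xs ys : List (String × String)) :
    pvCap m acc (xs ++ ys)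
      = match pvCap m acc xs with
        | (p, true) => (p, true)
        | (p, false) => pvCap m p ys := by
  by_cases h : pvK m acc ≤ xs.length
  · have ht : (xs ++ ys).take (pvK m acc) = xs.take (pvK m acc) := by
      rw [List.take_append_of_le_length h]
    simp [pvCap, ht, h]
    omega
  · have hxs : xs.take (pvK m acc) = xs := List.take_of_length_le (by omega)
    have hK2 : pvK m (acc ++ xs) = pvK m acc - xs.length := by
      have h1 := pvK_pos m acc
      unfold pvK at *; simp; omega
    have ht : (xs ++ ys).take (pvK m acc) = xs ++ ys.take (pvK m acc - xs.length) := by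
      rw [List.take_append, hxs]
    have hd : decide (pvK m acc ≤ xs.length) = false := by simp [h]
    simp only [pvCap, ht, hd, hxs, hK2, List.append_assoc, Prod.mk.injEq]
    refine ⟨trivial, ?_⟩
    rw [decide_eq_decide]
    simp
    omega

lemma pvILoop_eq_cap (ids : List String) (n m : Int) :
    ∀ (is : List Int) (acc : List (String × String)),
      pvILoop ids n m acc is
        = pvCap m acc (is.flatMap (fun i =>
            (PySem.List.pyRange (i + 1) n 1).map
              (fun j => (PySem.List.pyGetD ids i "", PySem.List.pyGetD ids j "")))) := by
  intro is
  induction is with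
  | nil =>
    intro acc
    have h := pvK_pos m acc
    simp [pvILoop, pvCap]
    omega
  | cons i is' ih =>
    intro acc
    rw [pvILoop, pvJLoop_eq_cap, List.flatMap_cons, pvCap_append]
    cases hc : pvCap m acc ((PySem.List.pyRange (i + 1) n 1).map
        (fun j => (PySem.List.pyGetD ids i "", PySem.List.pyGetD ids j ""))) with
    | mk p b =>
      cases b with
      | true => simp
      | false => simp [ih]

-- pairs A produces inside one block (before the cap)
def pvBlockPairs (ids : List String) : List (String × String) :=
  (PySem.List.pyRange 0 ids.length 1).flatMap (fun i =>
    (PySem.List.pyRange (i + 1) ids.length 1).map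
      (fun j => (PySem.List.pyGetD ids i "", PySem.List.pyGetD ids j "")))

lemma map_pyGetD_pyRange_eq_drop (ids : List String) (a : Int) (ha : 0 ≤ a) :
    (PySem.List.pyRange a ids.length 1).map (fun j => PySem.List.pyGetD ids j "")
      = ids.drop a.toNat := by
  rw [PySem.List.pyRange_one]
  rw [List.map_map]
  apply List.ext_getElem
  · simp; omega
  · intro k h1 h2
    simp only [List.getElem_map, List.getElem_range, Function.comp]
    rw [List.getElem_drop]
    rw [PySem.List.pyGetD_eq_getElem ids "" (by omega) (by simp at h1; omega)]
    congr 1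
    simp at h1
    omega

lemma pvCombs_eq_blockPairs (ids : List String) : pvCombs ids = pvBlockPairs ids := by
  unfold pvCombs pvBlockPairs
  rw [PySem.List.enumerate_eq_map_pyRange ids ""]
  rw [List.flatMap_map]
  apply List.flatMap_congr
  intro i hi
  have h0 : 0 ≤ i := ((PySem.List.mem_pyRange_one).1 hi).1
  rw [PySem.List.slice_from ids (by omega : (0:Int) ≤ i + 1)]
  rw [← map_pyGetD_pyRange_eq_drop ids (i + 1) (by omega)]
  rw [List.map_map]
  rfl

lemma pvCombs_short (ids : List String) (h : ids.length < 2) : pvCombs ids = [] := by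
  match ids, h with
  | [], _ => decide
  | [x], _ => simp [pvCombs, PySem.List.enumerate, PySem.List.slice, PySem.List.clampIdx]

-- A = take (max m 1) of the flat pair list
def pvAllPairs (blocks : List (String × List String)) : List (String × String) :=
  blocks.flatMap (fun blk => pvCombs blk.2)

lemma pvBlocksLoop_eq (m : Int) :
    ∀ (bs : List (String × List String)) (acc : List (String × String)),
      pvBlocksLoop m acc bs = acc ++ (pvAllPairs bs).take (pvK m acc) := by
  intro bs
  induction bs with
  | nil => intro acc; simp [pvBlocksLoop, pvAllPairs]
  | cons blk bs' ih =>
    intro acc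
    obtain ⟨name, ids⟩ := blk
    show pvBlocksLoop m acc ((name, ids) :: bs') = _
    have hall : pvAllPairs ((name, ids) :: bs') = pvCombs ids ++ pvAllPairs bs' := by
      simp [pvAllPairs]
    rw [pvBlocksLoop]
    by_cases hn : (ids.length : Int) < 2
    · have hshort : pvCombs ids = [] := pvCombs_short ids (by exact_mod_cast hn)
      simp only [hn, if_true, ih, hall, hshort, List.nil_append]
    · simp only [hn, if_false]
      rw [pvILoop_eq_cap]
      have : (PySem.List.pyRange 0 (ids.length : Int) 1).flatMap (fun i =>
          (PySem.List.pyRange (i + 1) (ids.length : Int) 1).map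
            (fun j => (PySem.List.pyGetD ids i "", PySem.List.pyGetD ids j "")))
          = pvCombs ids := (pvCombs_eq_blockPairs ids).symm
      rw [this]
      by_cases hstop : pvK m acc ≤ (pvCombs ids).length
      · have ht : (pvCombs ids ++ pvAllPairs bs').take (pvK m acc)
            = (pvCombs ids).take (pvK m acc) := List.take_append_of_le_length hstop
        simp [pvCap, hstop, hall, ht]
      · have hxs : (pvCombs ids).take (pvK m acc) = pvCombs ids :=
          List.take_of_length_le (by omega)
        have hK2 : pvK m (acc ++ pvCombs ids) = pvK m acc - (pvCombs ids).length := by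
          have h1 := pvK_pos m acc
          unfold pvK at *; simp; omega
        have ht : (pvCombs ids ++ pvAllPairs bs').take (pvK m acc)
            = pvCombs ids ++ (pvAllPairs bs').take (pvK m acc - (pvCombs ids).length) := by
          rw [List.take_append, hxs]
        have hd : decide (pvK m acc ≤ (pvCombs ids).length) = false := by simp [hstop]
        simp only [pvCap, hd, hxs]
        rw [ih, hK2, hall, ht, List.append_assoc]

lemma generate_block_pairs_closed (blocks : List (String × List String)) (m : Int) :
    generate_block_pairs blocks m = (pvAllPairs blocks).take (max m 1).toNat := by
  rw [generate_block_pairs, pvBlocksLoop_eq]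
  simp [pvK]

lemma generate_block_pairs_alt_closed (blocks : List (String × List String)) (m : Int) :
    generate_block_pairs_alt blocks m = (pvAllPairs blocks).take (max 0 m).toNat := by
  simp only [generate_block_pairs_alt, pvAllPairs]
  rw [PySem.List.slice_to _ (by omega : (0:Int) ≤ max 0 m)]

lemma pvAllPairs_nil_of_short (blocks : List (String × List String))
    (h : ¬ ∃ blk ∈ blocks, 2 ≤ blk.2.length) : pvAllPairs blocks = [] := by
  rw [pvAllPairs, List.flatMap_eq_nil_iff]
  intro blk hblk
  exact pvCombs_short blk.2 (by push Not at h; have := h blk hblk; omega)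

-- ===== VERDICT (by name: the statement is the Claim_ definition above) =====
theorem generate_block_pairs_spec : Claim_unchanged_generate_block_pairs := by
  intro blocks m _ hD
  rw [generate_block_pairs_closed, generate_block_pairs_alt_closed]
  by_cases hm : m ≤ 0
  · have hall : pvAllPairs blocks = [] := by
      apply pvAllPairs_nil_of_short
      intro hex
      exact hD ⟨hm, hex⟩
    simp [hall]
  · congr 1
    omega

theorem generate_block_pairs_changed : Claim_changed_generate_block_pairs := by
  unfold Claim_changed_generate_block_pairs; decide

theorem generate_block_pairs_tight : Claim_exact_generate_block_pairs := by
  intro blocks m _ hD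
  obtain ⟨hm, blk, hblk, hlen⟩ := hD
  rw [generate_block_pairs_closed, generate_block_pairs_alt_closed]
  have h1 : (max m 1).toNat = 1 := by omega
  have h0 : (max 0 m).toNat = 0 := by omega
  rw [h1, h0, List.take_zero]
  have hne : pvCombs blk.2 ≠ [] := by
    obtain ⟨a, b, rest, hids⟩ : ∃ a b rest, blk.2 = a :: b :: rest := by
      match blk.2, hlen with
      | a :: b :: rest, _ => exact ⟨a, b, rest, rfl⟩
    rw [hids]
    simp [pvCombs, PySem.List.enumerate, PySem.List.slice, PySem.List.clampIdx]
  have hall : pvAllPairs blocks ≠ [] := by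
    rw [pvAllPairs]
    intro hnil
    rw [List.flatMap_eq_nil_iff] at hnil
    exact hne (hnil blk hblk)
  cases hall' : pvAllPairs blocks with
  | nil => exact absurd hall' hall
  | cons p ps => simp
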